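-- pv_equiv track=rewrite | github.com/TACS-UCSC/gust2 | tokenizer.py | unflatten_to_scales
-- ===== SOURCE A (Python) =====
-- def unflatten_to_scales(flat_indices, scales):
--     """Unflatten 1D indices back to per-scale list of (s²,) arrays."""
--     result = []
--     offset = 0
--     for s in scales:
--         size = s * s
--         result.append(flat_indices[offset:offset + size])
--         offset += size
--     return result
-- ===== SOURCE B (Python) =====
-- def unflatten_to_scales(flat_indices, scales):
--     """Unflatten 1D indices back to per-scale list of (s²,) arrays."""
--     bounds = [0]
--     for s in scales:
--         bounds.append(bounds[-1] + s * s)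
--     return [flat_indices[a:b] for a, b in zip(bounds, bounds[1:])]
-- ===== Notes on version B (the rewrite author's own statement) =====
-- stated objective: alternative
-- what changed: Replaces the running-offset accumulator loop with an upfront prefix-sum boundary table followed by a pairwise zip pass that slices between consecutive boundaries.
import Mathlib
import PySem

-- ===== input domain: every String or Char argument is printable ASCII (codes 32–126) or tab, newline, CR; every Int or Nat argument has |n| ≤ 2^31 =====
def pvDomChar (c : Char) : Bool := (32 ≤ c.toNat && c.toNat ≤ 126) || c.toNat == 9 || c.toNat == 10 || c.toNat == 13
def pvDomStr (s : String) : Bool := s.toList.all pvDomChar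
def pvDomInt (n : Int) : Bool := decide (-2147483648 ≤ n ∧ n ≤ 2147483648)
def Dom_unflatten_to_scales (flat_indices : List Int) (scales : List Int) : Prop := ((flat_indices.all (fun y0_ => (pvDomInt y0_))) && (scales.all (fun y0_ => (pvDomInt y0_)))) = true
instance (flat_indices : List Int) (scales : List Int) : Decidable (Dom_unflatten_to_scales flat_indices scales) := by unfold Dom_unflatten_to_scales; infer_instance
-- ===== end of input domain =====

-- B replaces A's running-offset accumulator with an upfront prefix-sum boundary table
-- and a pairwise zip pass slicing between consecutive boundaries (alternative decomposition, same cost).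


-- ===== PORT A =====
-- for s in scales: result.append(flat_indices[offset:offset+size]); offset += size
def unflatten_to_scales (flat_indices : List Int) (scales : List Int) : List (List Int) :=
  (scales.foldl
    (fun (st : List (List Int) × Int) s =>
      let size := s * s
      (st.1 ++ [PySem.List.slice flat_indices (some st.2) (some (st.2 + size))], st.2 + size))
    ([], 0)).1

-- ===== PORT B =====
-- bounds = [0]; for s in scales: bounds.append(bounds[-1] + s*s)
-- (bounds is always nonempty, so bounds[-1] is exactly getLast!)
def pvBounds (scales : List Int) : List Int :=
  scales.foldl (fun bs s => bs ++ [bs.getLast! + s * s]) [0]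

-- [flat_indices[a:b] for a, b in zip(bounds, bounds[1:])]
def unflatten_to_scales_alt (flat_indices : List Int) (scales : List Int) : List (List Int) :=
  ((pvBounds scales).zip ((pvBounds scales).drop 1)).map
    (fun p => PySem.List.slice flat_indices (some p.1) (some p.2))

-- ===== PRECONDITION & SPEC =====
def Spec_unflatten_to_scales (flat_indices : List Int) (scales : List Int) (out : List (List Int)) : Prop := out = unflatten_to_scales_alt flat_indices scales
instance (flat_indices : List Int) (scales : List Int) (out : List (List Int)) : Decidable (Spec_unflatten_to_scales flat_indices scales out) := by unfold Spec_unflatten_to_scales; infer_instance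

-- ===== CLAIM (what is proved, stated in full; the proofs are below) =====
def Claim_equal_unflatten_to_scales : Prop := ∀ (flat_indices : List Int) (scales : List Int), Dom_unflatten_to_scales flat_indices scales → Spec_unflatten_to_scales flat_indices scales (unflatten_to_scales flat_indices scales)

-- ===== LEMMAS AND PROOFS =====

-- common specification: the slice at each running offset
def pvGo (fi : List Int) (off : Int) : List Int → List (List Int)
  | [] => []
  | s :: t => PySem.List.slice fi (some off) (some (off + s * s)) :: pvGo fi (off + s * s) t

-- the boundary values after a given offset
def pvTail (off : Int) : List Int → List Int
  | [] => []
  | s :: t => (off + s * s) :: pvTail (off + s * s) t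

theorem unflatten_foldl_eq (fi : List Int) (scales : List Int) :
    ∀ (acc : List (List Int)) (off : Int),
      (scales.foldl
        (fun (st : List (List Int) × Int) s =>
          (st.1 ++ [PySem.List.slice fi (some st.2) (some (st.2 + s * s))], st.2 + s * s))
        (acc, off)).1 = acc ++ pvGo fi off scales := by
  induction scales with
  | nil => intro acc off; simp [pvGo]
  | cons s t ih =>
    intro acc off
    simp only [List.foldl_cons, pvGo]
    rw [ih]
    simp

theorem pvBounds_eq (scales : List Int) :
    ∀ (bs : List Int) (l : Int), bs.getLast! = l →
      scales.foldl (fun bs s => bs ++ [bs.getLast! + s * s]) bs = bs ++ pvTail l scales := by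
  induction scales with
  | nil => intro bs l _; simp [pvTail]
  | cons s t ih =>
    intro bs l hl
    simp only [List.foldl_cons, pvTail, hl]
    rw [ih (bs ++ [l + s * s]) (l + s * s) (by rw [List.getLast!_eq_getLast?_getD, List.getLast?_concat]; rfl)]
    simp

theorem zip_tail_eq (fi : List Int) (t : List Int) :
    ∀ (off : Int),
      (((off :: pvTail off t).zip (pvTail off t)).map
        (fun p => PySem.List.slice fi (some p.1) (some p.2))) = pvGo fi off t := by
  induction t with
  | nil => intro off; simp [pvTail, pvGo]
  | cons s u ih =>
    intro off
    simp only [pvTail, pvGo, List.zip_cons_cons, List.map_cons]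
    exact congrArg _ (ih (off + s * s))

-- ===== VERDICT (by name: the statement is the Claim_ definition above) =====
theorem unflatten_to_scales_spec : Claim_equal_unflatten_to_scales := by
  intro fi scales _
  unfold Spec_unflatten_to_scales unflatten_to_scales unflatten_to_scales_alt pvBounds
  rw [unflatten_foldl_eq, pvBounds_eq scales [0] 0 (by simp)]
  simp [zip_tail_eq]
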